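-- pv_equiv track=rewrite | github.com/jm4ch4do/m4ch4do_myCWs | 5kyu/exit_map.py | reduce_directions
-- ===== SOURCE A (Python) =====
-- def reduce_directions(_directions):
--     _reduced_directions = []
--     for value in _directions:
--
--         # no previous directions -> save
--         if not _reduced_directions:
--             _reduced_directions.append(value)
--             continue
--
--         # find if value is opposed to last saved direction (ex. 'up' is opposed to 'down')
--         opposite = are_directions_opposite(value, _reduced_directions[-1])
--
--         # not opposed -> save
--         if not opposite:
--             _reduced_directions.append(value)
--             continue
--
--         # directions are opposite -> do not store and erase previous
--         else:
--             _reduced_directions.pop()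
--             continue
--
--     return _reduced_directions
--
-- def are_directions_opposite(dir1, dir2):
--     if dir1 == 'up' and dir2 == 'down':
--         return True
--     if dir1 == 'down' and dir2 == 'up':
--         return True
--     if dir1 == 'left' and dir2 == 'right':
--         return True
--     if dir1 == 'right' and dir2 == 'left':
--         return True
--
--     return False
-- ===== SOURCE B (Python) =====
-- OPPOSITE = {'up': 'down', 'down': 'up', 'left': 'right', 'right': 'left'}
--
--
-- def reduce_directions(_directions):
--     res = list(_directions)
--     while True:
--         removed = False
--         for i in range(len(res) - 1):
--             if OPPOSITE.get(res[i]) == res[i + 1]: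
--                 del res[i:i + 2]
--                 removed = True
--                 break
--         if not removed:
--             return res
-- ===== Notes on version B (the rewrite author's own statement) =====
-- stated objective: alternative
-- what changed: Replaces the single-pass stack reduction with a fixed-point loop that repeatedly scans a copy of the list for the first adjacent opposite pair (via an opposite-direction dict) and deletes it until no pair remains; confluence of the cancellation makes the normal form identical.
import Mathlib
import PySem

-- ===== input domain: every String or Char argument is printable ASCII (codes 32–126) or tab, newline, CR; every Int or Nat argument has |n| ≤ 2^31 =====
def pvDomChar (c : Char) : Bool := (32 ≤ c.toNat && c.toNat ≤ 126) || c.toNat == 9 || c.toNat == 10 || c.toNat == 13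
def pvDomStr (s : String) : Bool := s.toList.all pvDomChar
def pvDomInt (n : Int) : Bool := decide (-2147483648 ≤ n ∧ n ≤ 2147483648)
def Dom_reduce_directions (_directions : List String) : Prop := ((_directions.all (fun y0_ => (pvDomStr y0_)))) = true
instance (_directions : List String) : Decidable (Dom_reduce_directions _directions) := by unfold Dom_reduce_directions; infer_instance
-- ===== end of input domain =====

-- B replaces A's single-pass stack with a fixed-point loop that repeatedly deletes the first
-- adjacent opposite pair (found via an opposite-direction dict) until none remains; it works
-- on a copy, so like A it does not mutate the argument (objective: alternative, not faster).

-- ===== PORT A =====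
def are_directions_opposite (dir1 dir2 : String) : Bool :=
  if dir1 = "up" ∧ dir2 = "down" then true
  else if dir1 = "down" ∧ dir2 = "up" then true
  else if dir1 = "left" ∧ dir2 = "right" then true
  else if dir1 = "right" ∧ dir2 = "left" then true
  else false

def reduce_directions (_directions : List String) : List String :=
  _directions.foldl (fun _reduced_directions value =>
    if _reduced_directions.isEmpty then _reduced_directions ++ [value]
    else
      let opposite :=
        are_directions_opposite value ((PySem.List.pyGet? _reduced_directions (-1)).getD "")
      if opposite = false then _reduced_directions ++ [value]
      else _reduced_directions.dropLast) []

-- ===== PORT B =====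
def OPPOSITE : PySem.Dict String String :=
  PySem.Dict.ofList [("up", "down"), ("down", "up"), ("left", "right"), ("right", "left")]

-- the inner for-loop of Source B: delete the FIRST adjacent opposite pair, none if no pair found
def removeFirstOpp : List String → Option (List String)
  | [] => none
  | [_] => none
  | a :: b :: rest =>
    if OPPOSITE.get? a == some b then some rest
    else (removeFirstOpp (b :: rest)).map (a :: ·)

-- termination measure for the while-loop (cited by bLoop's decreasing_by)
theorem removeFirstOpp_length_lt :
    ∀ {l l' : List String}, removeFirstOpp l = some l' → l'.length < l.length := by
  intro l
  induction l with
  | nil => intro l' h; simp [removeFirstOpp] at h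
  | cons a t ih =>
    intro l' h
    match t, h with
    | [], h => simp [removeFirstOpp] at h
    | b :: rest, h =>
      rw [removeFirstOpp] at h
      split at h
      · simp at h; subst h; simp
      · cases hm : removeFirstOpp (b :: rest) with
        | none => rw [hm] at h; simp at h
        | some m =>
          rw [hm] at h; simp at h; subst h
          have := ih hm
          simp at this ⊢
          omega

-- the while-loop of Source B: repeat until no adjacent opposite pair remains
def bLoop (l : List String) : List String :=
  match h : removeFirstOpp l with
  | none => l
  | some l' => bLoop l'
termination_by l.length
decreasing_by exact removeFirstOpp_length_lt h

def reduce_directions_alt (_directions : List String) : List String :=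
  bLoop _directions

-- ===== PRECONDITION & SPEC =====
def Spec_reduce_directions (_directions : List String) (out : List String) : Prop := out = reduce_directions_alt _directions
instance (_directions : List String) (out : List String) : Decidable (Spec_reduce_directions _directions out) := by unfold Spec_reduce_directions; infer_instance

-- ===== CLAIM (what is proved, stated in full; the proofs are below) =====
def Claim_equal_reduce_directions : Prop := ∀ (_directions : List String), Dom_reduce_directions _directions → Spec_reduce_directions _directions (reduce_directions _directions)

-- ===== LEMMAS AND PROOFS =====

-- A's loop body, named for the proofs (definitionally the lambda inside reduce_directions)
def stepA (r : List String) (v : String) : List String :=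
  if r.isEmpty then r ++ [v]
  else
    let opposite := are_directions_opposite v ((PySem.List.pyGet? r (-1)).getD "")
    if opposite = false then r ++ [v] else r.dropLast

theorem reduceA_eq_foldl (l : List String) :
    reduce_directions l = l.foldl stepA [] := rfl

theorem str_beq_eq_decide (a b : String) : (a == b) = decide (a = b) := by
  by_cases h : a = b <;> simp [h]

theorem oppB_eq_oppA (a b : String) :
    (OPPOSITE.get? a == some b) = are_directions_opposite a b := by
  have h : OPPOSITE = PySem.Dict.mk [("up","down"),("down","up"),("left","right"),("right","left")] := by decide
  rw [h]
  simp only [PySem.Dict.get?_mk_cons]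
  by_cases h1 : a = "up" <;> by_cases h2 : a = "down" <;> by_cases h3 : a = "left" <;>
      by_cases h4 : a = "right" <;> subst_vars <;>
    simp_all [are_directions_opposite, PySem.Dict.get?] <;>
    first
      | simp [str_beq_eq_decide, @eq_comm _ b]
      | (split_ifs <;> simp_all)

theorem opp_symm {a b : String} (h : are_directions_opposite a b = true) :
    are_directions_opposite b a = true := by
  simp [are_directions_opposite] at *
  rcases h with ⟨rfl, rfl⟩ | ⟨rfl, rfl⟩ | ⟨rfl, rfl⟩ | ⟨rfl, rfl⟩ <;> simp

theorem opp_unique {a b c : String} (h1 : are_directions_opposite a b = true)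
    (h2 : are_directions_opposite a c = true) : b = c := by
  simp [are_directions_opposite] at *
  rcases h1 with ⟨rfl, rfl⟩ | ⟨rfl, rfl⟩ | ⟨rfl, rfl⟩ | ⟨rfl, rfl⟩ <;> simp_all

theorem stepA_nil (v : String) : stepA [] v = [v] := rfl

theorem stepA_snoc (s : List String) (x v : String) :
    stepA (s ++ [x]) v =
      if are_directions_opposite v x then s else s ++ [x] ++ [v] := by
  simp [stepA, PySem.List.pyGet?_neg_one]
  split_ifs <;> simp_all

-- invariant: A's stack never contains an adjacent opposite pair
def StackInv (s : List String) : Prop :=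
  List.IsChain (fun u v => are_directions_opposite v u = false) s

theorem StackInv_step {s : List String} (hs : StackInv s) (v : String) :
    StackInv (stepA s v) := by
  rcases List.eq_nil_or_concat s with rfl | ⟨t, x, rfl⟩
  <;> (try simp only [List.concat_eq_append] at *)
  · simp [stepA_nil, StackInv]
  · rw [stepA_snoc]
    split_ifs with h
    · exact (List.isChain_append.mp hs).1
    · unfold StackInv at *
      rw [List.append_assoc, List.isChain_append]
      refine ⟨(List.isChain_append.mp hs).1, by simpa using Bool.eq_false_iff.mpr (fun hc => by simp [hc] at h), ?_⟩
      intro u hu w hw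
      simp at hw
      subst hw
      exact (List.isChain_append.mp hs).2.2 u hu x (by simp)

-- cancelling an adjacent opposite pair at the head leaves A's fold unchanged
theorem stepA_cancel {s : List String} (hs : StackInv s) {a b : String}
    (hab : are_directions_opposite a b = true) :
    stepA (stepA s a) b = s := by
  rcases List.eq_nil_or_concat s with rfl | ⟨t, x, rfl⟩
  <;> (try simp only [List.concat_eq_append] at *)
  · rw [stepA_nil]
    have h1 : ([a] : List String) = [] ++ [a] := rfl
    rw [h1, stepA_snoc]
    simp [opp_symm hab]
  · rw [stepA_snoc]
    split_ifs with h
    · have hbx : b = x := opp_unique hab h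
      subst hbx
      rcases List.eq_nil_or_concat t with rfl | ⟨u, y, rfl⟩
      · simp [stepA_nil]
      · simp only [List.concat_eq_append] at *
        rw [stepA_snoc]
        have hby : are_directions_opposite b y = false := by
          have h2 := (List.isChain_append.mp hs).2.2
          simpa using h2 y (by simp) b (by simp)
        simp [hby]
    · rw [stepA_snoc]
      simp [opp_symm hab]

-- deleting the first adjacent opposite pair anywhere leaves A's fold unchanged
theorem foldl_removeFirst :
    ∀ (l : List String) {s l' : List String}, StackInv s → removeFirstOpp l = some l' →
      l.foldl stepA s = l'.foldl stepA s := by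
  intro l
  induction l with
  | nil => intro s l' _ h; simp [removeFirstOpp] at h
  | cons a t ih =>
    intro s l' hs h
    match t, h with
    | [], h => simp [removeFirstOpp] at h
    | b :: rest, h =>
      rw [removeFirstOpp] at h
      split at h
      · rename_i hop
        rw [oppB_eq_oppA] at hop
        simp at h
        subst h
        simp only [List.foldl_cons]
        rw [stepA_cancel hs hop]
      · cases hm : removeFirstOpp (b :: rest) with
        | none => rw [hm] at h; simp at h
        | some m =>
          rw [hm] at h
          simp at h
          subst h
          simp only [List.foldl_cons]
          exact ih (StackInv_step hs a) hm

-- when no adjacent opposite pair remains, A's fold only pushes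
theorem foldl_no_pair :
    ∀ (l : List String) (s : List String), StackInv s →
      removeFirstOpp l = none →
      (∀ h t, l = h :: t → stepA s h = s ++ [h]) →
      l.foldl stepA s = s ++ l := by
  intro l
  induction l with
  | nil => intro s _ _ _; simp
  | cons a t ih =>
    intro s hs hnone hpush
    have hstep : stepA s a = s ++ [a] := hpush a t rfl
    simp only [List.foldl_cons, hstep]
    have hsa : StackInv (s ++ [a]) := by
      have := StackInv_step hs a
      rwa [hstep] at this
    match t, hnone with
    | [], _ => simp
    | b :: rest, hnone =>
      rw [removeFirstOpp] at hnone
      have hop : ¬ (OPPOSITE.get? a == some b) = true := by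
        intro hc; simp [hc] at hnone
      have hrest : removeFirstOpp (b :: rest) = none := by
        cases hm : removeFirstOpp (b :: rest) with
        | none => rfl
        | some m => rw [hm] at hnone; simp [hop] at hnone
      rw [oppB_eq_oppA] at hop
      have hba : are_directions_opposite b a = false := by
        cases hv : are_directions_opposite b a with
        | false => rfl
        | true => exact absurd (opp_symm hv) (by simpa using hop)
      have hrec := ih (s ++ [a]) hsa hrest
        (by intro h' t' he
            injection he with h1 _
            subst h1
            rw [stepA_snoc]
            simp [hba])
      simpa using hrec

theorem main_eq (l : List String) : l.foldl stepA [] = bLoop l := by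
  induction l using bLoop.induct with
  | case1 l h =>
    rw [bLoop, h]
    exact foldl_no_pair l [] (by simp [StackInv]) h (by intro h' t' he; subst he; rfl)
  | case2 l l' h ih =>
    rw [bLoop, h]
    rw [foldl_removeFirst l (by simp [StackInv]) h]
    exact ih

-- ===== VERDICT (by name: the statement is the Claim_ definition above) =====
theorem reduce_directions_spec : Claim_equal_reduce_directions := by
  intro l _
  unfold Spec_reduce_directions reduce_directions_alt
  rw [reduceA_eq_foldl, main_eq]
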